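-- pv_equiv track=rewrite | github.com/fkeldh2089/TIL | date/2022-02-10(algorithm)/1220_Magnetic/1220_Magnetic.py | magnetic
-- ===== SOURCE A (Python) =====
-- def magnetic(n, mfield):
--     cnt_sum = 0
--     for q in range(n):
--         f = 1  # 플래그
--         cnt = 0
--         for p in range(n):
--             if mfield[p][q] == 1:
--                 if f == 1:
--                     f = 2
--             elif mfield[p][q] == 2:  # 1 다음에 2가 오면 cnt 증가
--                 if f == 2:  # 2가 연속되면 cnt증가는 되지 않음
--                     cnt += 1
--                     f = 1
--         cnt_sum += cnt
--     return cnt_sum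
-- ===== SOURCE B (Python) =====
-- def magnetic(n, mfield):
--     total = 0
--     for q in range(n):
--         vals = [mfield[p][q] for p in range(n) if mfield[p][q] in (1, 2)]
--         total += sum(1 for a, b in zip(vals, vals[1:]) if a == 1 and b == 2)
--     return total
-- ===== Notes on version B (the rewrite author's own statement) =====
-- stated objective: simpler
-- what changed: Replaces the per-column flag state machine with a filter of the column to values in {1,2} followed by counting adjacent (1,2) pairs in the filtered list.
import Mathlib
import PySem

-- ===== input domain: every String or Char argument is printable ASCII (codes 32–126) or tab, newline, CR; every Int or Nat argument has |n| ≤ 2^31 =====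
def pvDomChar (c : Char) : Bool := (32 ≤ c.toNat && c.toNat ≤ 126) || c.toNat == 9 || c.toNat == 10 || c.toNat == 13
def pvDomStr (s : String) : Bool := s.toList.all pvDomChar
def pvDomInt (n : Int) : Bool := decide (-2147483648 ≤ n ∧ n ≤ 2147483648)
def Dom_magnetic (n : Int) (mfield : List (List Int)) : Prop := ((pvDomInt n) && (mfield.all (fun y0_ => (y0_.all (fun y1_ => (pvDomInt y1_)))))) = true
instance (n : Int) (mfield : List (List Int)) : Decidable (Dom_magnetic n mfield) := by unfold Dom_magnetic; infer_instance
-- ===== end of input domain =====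

-- B replaces A's per-column flag state machine by filtering each column to {1,2} and
-- counting adjacent (1,2) pairs: simpler decomposition, same O(n^2) cost.

-- ===== PORT A =====
-- mfield[p][q]: pyGetD defaults are never reached inside Pre_magnetic (where Python returns)
def magnetic (n : Int) (mfield : List (List Int)) : Int :=
  (PySem.List.pyRange 0 n 1).foldl (fun cnt_sum q =>
    let st := (PySem.List.pyRange 0 n 1).foldl (fun (st : Int × Int) p =>
      let v := PySem.List.pyGetD (PySem.List.pyGetD mfield p []) q 0
      if v = 1 then (if st.1 = 1 then ((2 : Int), st.2) else st)
      else if v = 2 then (if st.1 = 2 then ((1 : Int), st.2 + 1) else st)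
      else st) (1, 0)
    cnt_sum + st.2) 0

-- ===== PORT B =====
def magnetic_alt (n : Int) (mfield : List (List Int)) : Int :=
  (PySem.List.pyRange 0 n 1).foldl (fun total q =>
    let vals := ((PySem.List.pyRange 0 n 1).map (fun p =>
        PySem.List.pyGetD (PySem.List.pyGetD mfield p []) q 0)).filter
        (fun v => v == 1 || v == 2)
    total + (vals.zip vals.tail).foldl
        (fun s ab => if ab.1 = 1 ∧ ab.2 = 2 then s + 1 else s) 0) 0

-- ===== PRECONDITION & SPEC =====
-- Pre_: exactly where Python A returns (no IndexError): every mfield[p][q] with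
-- 0 ≤ p,q < n is in range, i.e. n ≤ len(mfield) and the first n rows have length ≥ n.
def Pre_magnetic (n : Int) (mfield : List (List Int)) : Prop :=
  n ≤ 0 ∨ (n ≤ mfield.length ∧ ∀ row ∈ mfield.take n.toNat, n ≤ row.length)
instance (n : Int) (mfield : List (List Int)) : Decidable (Pre_magnetic n mfield) := by
  unfold Pre_magnetic; infer_instance
def pvWitness_magnetic : Int × List (List Int) := (2, [[1, 2], [2, 1]])

def Spec_magnetic (n : Int) (mfield : List (List Int)) (out : Int) : Prop := out = magnetic_alt n mfield
instance (n : Int) (mfield : List (List Int)) (out : Int) : Decidable (Spec_magnetic n mfield out) := by unfold Spec_magnetic; infer_instance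

-- ===== CLAIM (what is proved, stated in full; the proofs are below) =====
def Claim_equal_magnetic : Prop := ∀ (n : Int) (mfield : List (List Int)), Dom_magnetic n mfield → Pre_magnetic n mfield → Spec_magnetic n mfield (magnetic n mfield)

-- ===== LEMMAS AND PROOFS =====

-- A's inner-loop step, as a named function (definitionally the lambda in the port)
def stepA (st : Int × Int) (v : Int) : Int × Int :=
  if v = 1 then (if st.1 = 1 then ((2 : Int), st.2) else st)
  else if v = 2 then (if st.1 = 2 then ((1 : Int), st.2 + 1) else st)
  else st

-- number of adjacent (1,2) pairs in a list
def countPairs : List Int → Int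
  | a :: b :: t => (if a = 1 ∧ b = 2 then 1 else 0) + countPairs (b :: t)
  | _ => 0

lemma countPairs_cons_ne_one (a : Int) (xs : List Int) (h : a ≠ 1) :
    countPairs (a :: xs) = countPairs xs := by
  cases xs with
  | nil => simp [countPairs]
  | cons b t => simp [countPairs, h]

lemma zip_count (l : List Int) :
    ∀ s : Int, (l.zip l.tail).foldl (fun s ab => if ab.1 = 1 ∧ ab.2 = 2 then s + 1 else s) s
      = s + countPairs l := by
  induction l with
  | nil => intro s; simp [countPairs]
  | cons a t ih =>
    cases t with
    | nil => intro s; simp [countPairs]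
    | cons b t2 =>
      intro s
      have : (a :: b :: t2).zip (a :: b :: t2).tail = (a, b) :: ((b :: t2).zip (b :: t2).tail) := by
        simp [List.zip]
      rw [this, List.foldl_cons, ih]
      show (if a = 1 ∧ b = 2 then s + 1 else s) + countPairs (b :: t2)
        = s + ((if a = 1 ∧ b = 2 then 1 else 0) + countPairs (b :: t2))
      split_ifs <;> ring

lemma machine (l : List Int) :
    ∀ f cnt : Int, (f = 1 ∨ f = 2) →
      (l.foldl stepA (f, cnt)).2
        = cnt + countPairs ((if f = 2 then [(1 : Int)] else []) ++ l.filter (fun v => v == 1 || v == 2)) := by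
  induction l with
  | nil =>
    intro f cnt hf
    rcases hf with h | h <;> subst h <;> simp [countPairs]
  | cons a t ih =>
    intro f cnt hf
    by_cases h1 : a = 1
    · subst h1
      rw [List.foldl_cons]
      have hs : stepA (f, cnt) 1 = (2, cnt) := by
        rcases hf with h | h <;> subst h <;> simp [stepA]
      rw [hs, ih 2 cnt (Or.inr rfl)]
      rcases hf with h | h <;> subst h <;> simp [countPairs]
    · by_cases h2 : a = 2
      · subst h2
        rw [List.foldl_cons]
        rcases hf with h | h
        · subst h
          have hs : stepA ((1 : Int), cnt) 2 = (1, cnt) := by simp [stepA]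
          rw [hs, ih 1 cnt (Or.inl rfl)]
          simp only [if_neg (by norm_num : (1 : Int) ≠ 2), List.nil_append]
          rw [show (((2 : Int) :: t).filter (fun v => v == 1 || v == 2))
              = 2 :: (t.filter (fun v => v == 1 || v == 2)) by simp,
            countPairs_cons_ne_one 2 _ (by norm_num)]
        · subst h
          have hs : stepA ((2 : Int), cnt) 2 = (1, cnt + 1) := by simp [stepA]
          rw [hs, ih 1 (cnt + 1) (Or.inl rfl)]
          have e : (((2 : Int) :: t).filter (fun v => v == 1 || v == 2))
              = 2 :: (t.filter (fun v => v == 1 || v == 2)) := by simp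
          rw [e]
          have e2 : countPairs (1 :: 2 :: t.filter (fun v => v == 1 || v == 2))
              = 1 + countPairs (2 :: t.filter (fun v => v == 1 || v == 2)) := by
            simp [countPairs]
          have e3 := countPairs_cons_ne_one 2 (t.filter (fun v => v == 1 || v == 2)) (by norm_num)
          norm_num [e2, e3]
          ring
      · rw [List.foldl_cons]
        have hs : stepA (f, cnt) a = (f, cnt) := by simp [stepA, h1, h2]
        rw [hs, ih f cnt hf]
        have : ((a :: t).filter (fun v => v == 1 || v == 2))
            = t.filter (fun v => v == 1 || v == 2) := by
          simp [h1, h2]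
        rw [this]

lemma foldl_ext {α β : Type} (f g : β → α → β) (h : ∀ s x, f s x = g s x) :
    ∀ (L : List α) (i : β), L.foldl f i = L.foldl g i := by
  intro L
  induction L with
  | nil => intro i; rfl
  | cons a t ih => intro i; rw [List.foldl_cons, List.foldl_cons, h, ih]

-- per-column equality: A's flag machine = B's filtered pair count
lemma col_eq (n : Int) (mfield : List (List Int)) (q : Int) :
    ((PySem.List.pyRange 0 n 1).foldl (fun (st : Int × Int) p =>
      let v := PySem.List.pyGetD (PySem.List.pyGetD mfield p []) q 0
      if v = 1 then (if st.1 = 1 then ((2 : Int), st.2) else st)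
      else if v = 2 then (if st.1 = 2 then ((1 : Int), st.2 + 1) else st)
      else st) (1, 0)).2
    = (let vals := ((PySem.List.pyRange 0 n 1).map (fun p =>
          PySem.List.pyGetD (PySem.List.pyGetD mfield p []) q 0)).filter
          (fun v => v == 1 || v == 2)
       (vals.zip vals.tail).foldl (fun s ab => if ab.1 = 1 ∧ ab.2 = 2 then s + 1 else s) 0) := by
  have hA : ((PySem.List.pyRange 0 n 1).foldl (fun (st : Int × Int) p =>
      let v := PySem.List.pyGetD (PySem.List.pyGetD mfield p []) q 0
      if v = 1 then (if st.1 = 1 then ((2 : Int), st.2) else st)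
      else if v = 2 then (if st.1 = 2 then ((1 : Int), st.2 + 1) else st)
      else st) (1, 0))
    = (((PySem.List.pyRange 0 n 1).map (fun p =>
        PySem.List.pyGetD (PySem.List.pyGetD mfield p []) q 0)).foldl stepA (1, 0)) := by
    rw [List.foldl_map]
    rfl
  rw [hA]
  rw [machine _ 1 0 (Or.inl rfl)]
  rw [zip_count]
  simp

-- ===== VERDICT (by name: the statement is the Claim_ definition above) =====
theorem magnetic_spec : Claim_equal_magnetic := by
  intro n mfield _ _
  unfold Spec_magnetic magnetic magnetic_alt
  apply foldl_ext
  intro s q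
  simp only []
  rw [col_eq n mfield q]
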